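-- pv_equiv track=rewrite | github.com/ianwu0907/FYP2025_Ian | spreadsheet-normalizer/src/encoder/spreadsheet_encoder.py | expand_with_k_neighborhood
-- ===== SOURCE A (Python) =====
-- from typing import Any, Dict, Iterable, List, Optional, Sequence, Tuple, Set
--
-- def expand_with_k_neighborhood(indices: Set[int], k: int, max_index: int) -> List[int]:
--     """
--     Expand anchor indices with k-neighborhood. O(|indices| * k).
--     Ensures all indices are within valid range [1, max_index].
--     """
--     expanded = set()
--
--     for idx in indices:
--         for offset in range(-k, k + 1):
--             expanded_idx = idx + offset
--             if 1 <= expanded_idx <= max_index: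
--                 expanded.add(expanded_idx)
--
--     return sorted(expanded)
-- ===== SOURCE B (Python) =====
-- def expand_with_k_neighborhood(indices, k, max_index):
--     # Sweep the sorted distinct anchors left to right, emitting each clamped
--     # interval [max(1, idx-k), min(max_index, idx+k)] directly in ascending
--     # order; `prev` (greatest position already covered) coalesces overlapping
--     # or touching intervals, so no set and no final sort are needed.
--     out = []
--     prev = 0
--     for idx in sorted(set(indices)):
--         hi = min(max_index, idx + k)
--         lo = max(1, idx - k, prev + 1)
--         out.extend(range(lo, hi + 1))
--         prev = max(prev, hi)
--     return out
-- ===== Notes on version B (the rewrite author's own statement) =====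
-- stated objective: faster
-- what changed: Replaces the per-index +-k enumeration into a hash set followed by a final sort with a single left-to-right sweep over the sorted distinct anchors that emits each clamped interval past the last covered position, producing the output already sorted.
import Mathlib
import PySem

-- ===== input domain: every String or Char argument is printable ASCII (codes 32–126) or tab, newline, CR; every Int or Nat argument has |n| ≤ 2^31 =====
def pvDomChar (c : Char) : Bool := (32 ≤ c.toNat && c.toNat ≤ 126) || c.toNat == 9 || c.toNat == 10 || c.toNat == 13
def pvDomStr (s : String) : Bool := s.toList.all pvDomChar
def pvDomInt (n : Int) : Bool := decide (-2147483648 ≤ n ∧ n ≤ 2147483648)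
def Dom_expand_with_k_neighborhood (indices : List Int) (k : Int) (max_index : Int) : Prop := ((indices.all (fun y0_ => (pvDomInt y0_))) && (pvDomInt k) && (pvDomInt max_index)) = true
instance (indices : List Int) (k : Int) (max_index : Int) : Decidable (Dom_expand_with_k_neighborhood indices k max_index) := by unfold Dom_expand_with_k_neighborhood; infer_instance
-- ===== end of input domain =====

-- B replaces A's per-index ±k set-insertion plus final sort with a single sweep over the
-- sorted distinct anchors that emits each clamped interval past the last covered position.

-- ===== PORT A =====
def expand_with_k_neighborhood (indices : List Int) (k : Int) (max_index : Int) : List Int :=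
  let expanded : PySem.Set Int :=
    indices.foldl (fun expanded idx =>
      (PySem.List.pyRange (-k) (k + 1) 1).foldl (fun expanded offset =>
        let expanded_idx := idx + offset
        if 1 ≤ expanded_idx ∧ expanded_idx ≤ max_index then PySem.Set.add expanded expanded_idx
        else expanded) expanded) PySem.Set.empty
  PySem.List.sorted expanded (fun x => x) false

-- ===== PORT B =====
def expand_with_k_neighborhood_alt (indices : List Int) (k : Int) (max_index : Int) : List Int :=
  ((PySem.List.sorted (PySem.Set.ofList indices) (fun x => x) false).foldl
    (fun st idx =>
      let hi := min max_index (idx + k)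
      let lo := max (max 1 (idx - k)) (st.2 + 1)
      (st.1 ++ PySem.List.pyRange lo (hi + 1) 1, max st.2 hi))
    ([], 0)).1

-- ===== PRECONDITION & SPEC =====
def Spec_expand_with_k_neighborhood (indices : List Int) (k : Int) (max_index : Int) (out : List Int) : Prop := out = expand_with_k_neighborhood_alt indices k max_index
instance (indices : List Int) (k : Int) (max_index : Int) (out : List Int) : Decidable (Spec_expand_with_k_neighborhood indices k max_index out) := by unfold Spec_expand_with_k_neighborhood; infer_instance

-- ===== CLAIM (what is proved, stated in full; the proofs are below) =====
def Claim_equal_expand_with_k_neighborhood : Prop := ∀ (indices : List Int) (k : Int) (max_index : Int), Dom_expand_with_k_neighborhood indices k max_index → Spec_expand_with_k_neighborhood indices k max_index (expand_with_k_neighborhood indices k max_index)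

-- ===== LEMMAS AND PROOFS =====

-- membership in A's inner fold over the offsets
lemma memA_inner (max_index idx : Int) (os : List Int) (s : PySem.Set Int) (x : Int) :
    x ∈ os.foldl (fun expanded offset =>
        if 1 ≤ idx + offset ∧ idx + offset ≤ max_index then PySem.Set.add expanded (idx + offset)
        else expanded) s ↔
      x ∈ s ∨ ∃ o ∈ os, x = idx + o ∧ 1 ≤ x ∧ x ≤ max_index := by
  induction os generalizing s with
  | nil => simp
  | cons o t ih =>
      simp only [List.foldl_cons, ih, List.mem_cons]
      split_ifs with h
      · simp only [PySem.Set.mem_add]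
        constructor
        · rintro ((h' | h') | ⟨o', ho', rest⟩)
          · exact Or.inl h'
          · exact Or.inr ⟨o, Or.inl rfl, h', by omega⟩
          · exact Or.inr ⟨o', Or.inr ho', rest⟩
        · rintro (h' | ⟨o', ho' | ho', hx, hb⟩)
          · exact Or.inl (Or.inl h')
          · exact Or.inl (Or.inr (by omega))
          · exact Or.inr ⟨o', ho', hx, hb⟩
      · constructor
        · rintro (h' | ⟨o', ho', rest⟩)
          · exact Or.inl h'
          · exact Or.inr ⟨o', Or.inr ho', rest⟩
        · rintro (h' | ⟨o', ho' | ho', hx, h1, h2⟩)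
          · exact Or.inl h'
          · exact (h (by omega)).elim
          · exact Or.inr ⟨o', ho', hx, h1, h2⟩

-- A's inner fold preserves Nodup
lemma nodupA_inner (max_index idx : Int) (os : List Int) (s : PySem.Set Int)
    (hs : s.Nodup) :
    (os.foldl (fun expanded offset =>
        if 1 ≤ idx + offset ∧ idx + offset ≤ max_index then PySem.Set.add expanded (idx + offset)
        else expanded) s).Nodup := by
  induction os generalizing s with
  | nil => exact hs
  | cons o t ih =>
      simp only [List.foldl_cons]
      split_ifs with h
      · exact ih _ (PySem.Set.nodup_add _ _ hs)
      · exact ih _ hs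

-- membership in A's accumulated set
lemma memA_set (k max_index : Int) : ∀ (l : List Int) (s : PySem.Set Int) (x : Int),
    x ∈ l.foldl (fun expanded idx =>
        (PySem.List.pyRange (-k) (k + 1) 1).foldl (fun expanded offset =>
          if 1 ≤ idx + offset ∧ idx + offset ≤ max_index then PySem.Set.add expanded (idx + offset)
          else expanded) expanded) s ↔
      x ∈ s ∨ ∃ idx ∈ l, idx - k ≤ x ∧ x ≤ idx + k ∧ 1 ≤ x ∧ x ≤ max_index := by
  intro l
  induction l with
  | nil => simp
  | cons i t ih =>
      intro s x
      simp only [List.foldl_cons, ih, memA_inner, List.mem_cons]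
      constructor
      · rintro ((h | ⟨o, ho, hx, h1, h2⟩) | ⟨j, hj, rest⟩)
        · exact Or.inl h
        · rw [PySem.List.mem_pyRange_one] at ho
          exact Or.inr ⟨i, Or.inl rfl, by omega, by omega, h1, h2⟩
        · exact Or.inr ⟨j, Or.inr hj, rest⟩
      · rintro (h | ⟨j, hj | hj, h1, h2, h3, h4⟩)
        · exact Or.inl (Or.inl h)
        · subst hj
          refine Or.inl (Or.inr ⟨x - j, ?_, by omega, h3, h4⟩)
          rw [PySem.List.mem_pyRange_one]; omega
        · exact Or.inr ⟨j, hj, h1, h2, h3, h4⟩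

-- A's outer fold preserves Nodup
lemma nodupA_set (k max_index : Int) : ∀ (l : List Int) (s : PySem.Set Int), s.Nodup →
    (l.foldl (fun expanded idx =>
        (PySem.List.pyRange (-k) (k + 1) 1).foldl (fun expanded offset =>
          if 1 ≤ idx + offset ∧ idx + offset ≤ max_index then PySem.Set.add expanded (idx + offset)
          else expanded) expanded) s).Nodup := by
  intro l
  induction l with
  | nil => exact fun s hs => hs
  | cons i t ih =>
      intro s hs
      exact ih _ (nodupA_inner max_index i _ s hs)

-- B's sweep: membership characterisation and strict sortedness of the output
lemma B_inv (k max_index : Int) : ∀ (l : List Int) (out : List Int) (prev : Int),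
    l.Pairwise (· < ·) → out.Pairwise (· < ·) → (∀ x ∈ out, x ≤ prev) →
    (∀ x, x ∈ (l.foldl (fun st idx =>
        (st.1 ++ PySem.List.pyRange (max (max 1 (idx - k)) (st.2 + 1)) (min max_index (idx + k) + 1) 1,
         max st.2 (min max_index (idx + k)))) (out, prev)).1 ↔
      x ∈ out ∨ ∃ idx ∈ l, idx - k ≤ x ∧ x ≤ idx + k ∧ 1 ≤ x ∧ x ≤ max_index ∧ prev < x)
    ∧ (l.foldl (fun st idx =>
        (st.1 ++ PySem.List.pyRange (max (max 1 (idx - k)) (st.2 + 1)) (min max_index (idx + k) + 1) 1,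
         max st.2 (min max_index (idx + k)))) (out, prev)).1.Pairwise (· < ·) := by
  intro l
  induction l with
  | nil =>
      intro out prev _ hout _
      exact ⟨fun x => by simp, hout⟩
  | cons i t ih =>
      intro out prev hl hout hle
      rw [List.pairwise_cons] at hl
      simp only [List.foldl_cons]
      have hout' : (out ++ PySem.List.pyRange (max (max 1 (i - k)) (prev + 1))
          (min max_index (i + k) + 1) 1).Pairwise (· < ·) := by
        rw [List.pairwise_append]
        refine ⟨hout, PySem.List.pairwise_lt_pyRange_one _ _, ?_⟩
        intro a ha b hb
        rw [PySem.List.mem_pyRange_one] at hb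
        have := hle a ha; omega
      have hle' : ∀ x ∈ out ++ PySem.List.pyRange (max (max 1 (i - k)) (prev + 1))
          (min max_index (i + k) + 1) 1, x ≤ max prev (min max_index (i + k)) := by
        intro x hx
        rcases List.mem_append.1 hx with h | h
        · have := hle x h; omega
        · rw [PySem.List.mem_pyRange_one] at h; omega
      obtain ⟨hmem, hsort⟩ := ih _ _ hl.2 hout' hle'
      refine ⟨fun x => ?_, hsort⟩
      rw [hmem x]
      simp only [List.mem_append, PySem.List.mem_pyRange_one, List.mem_cons]
      constructor
      · rintro ((h | h) | ⟨j, hj, rest⟩)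
        · exact Or.inl h
        · exact Or.inr ⟨i, Or.inl rfl, by omega, by omega, by omega, by omega, by omega⟩
        · exact Or.inr ⟨j, Or.inr hj, rest.1, rest.2.1, rest.2.2.1, rest.2.2.2.1, by omega⟩
      · rintro (h | ⟨j, hj | hj, h1, h2, h3, h4, h5⟩)
        · exact Or.inl (Or.inl h)
        · subst hj; exact Or.inl (Or.inr (by omega))
        · by_cases hp : max prev (min max_index (i + k)) < x
          · exact Or.inr ⟨j, hj, h1, h2, h3, h4, hp⟩
          · have hij : i < j := hl.1 j hj
            exact Or.inl (Or.inr (by omega))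

-- membership in B's result
lemma memB (indices : List Int) (k max_index : Int) (x : Int) :
    x ∈ expand_with_k_neighborhood_alt indices k max_index ↔
      ∃ idx ∈ indices, idx - k ≤ x ∧ x ≤ idx + k ∧ 1 ≤ x ∧ x ≤ max_index := by
  simp only [expand_with_k_neighborhood_alt]
  obtain ⟨hmem, _⟩ := B_inv k max_index
    (PySem.List.sorted (PySem.Set.ofList indices) (fun x => x) false) [] 0
    (by simpa using PySem.List.sorted_ofList_pairwise_lt (xs := indices))
    (by simp) (by simp)
  rw [hmem x]
  simp only [List.not_mem_nil, false_or, PySem.List.mem_sorted, PySem.Set.mem_ofList]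
  constructor
  · rintro ⟨j, hj, h⟩; exact ⟨j, hj, h.1, h.2.1, h.2.2.1, h.2.2.2.1⟩
  · rintro ⟨j, hj, h1, h2, h3, h4⟩; exact ⟨j, hj, h1, h2, h3, h4, by omega⟩

-- B's result is strictly increasing
lemma B_sorted (indices : List Int) (k max_index : Int) :
    (expand_with_k_neighborhood_alt indices k max_index).Pairwise (· < ·) := by
  simp only [expand_with_k_neighborhood_alt]
  exact (B_inv k max_index
    (PySem.List.sorted (PySem.Set.ofList indices) (fun x => x) false) [] 0
    (by simpa using PySem.List.sorted_ofList_pairwise_lt (xs := indices))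
    (by simp) (by simp)).2

-- ===== VERDICT (by name: the statement is the Claim_ definition above) =====
theorem expand_with_k_neighborhood_spec : Claim_equal_expand_with_k_neighborhood := by
  intro indices k max_index _
  unfold Spec_expand_with_k_neighborhood
  simp only [expand_with_k_neighborhood]
  refine PySem.List.sorted_eq_of_perm_of_pairwise_lt _ _ _ ?_ ?_
  · rw [List.perm_ext_iff_of_nodup
      ((B_sorted indices k max_index).imp ne_of_lt)
      (nodupA_set k max_index indices PySem.Set.empty (by simp [PySem.Set.empty]))]
    intro x
    rw [memB, memA_set]
    simp
  · exact B_sorted indices k max_index
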